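-- pv_equiv track=rewrite | github.com/harperchen/StateRepro | crawler/crashes/poc_resolver.py | locate_crashed_sequence
-- ===== SOURCE A (Python) =====
-- from typing import List
--
-- def locate_crashed_sequence(sequence: str, crash_calls: List[str]) -> bool:
--     sequence_syscalls = sequence.split('-')
--     for syscall in crash_calls:
--         if syscall in sequence_syscalls:
--             return True
--         if '$' in syscall:
--             primitive = syscall[:syscall.find('$')]
--             if primitive in sequence_syscalls:
--                 return True
--
--     return False
-- ===== SOURCE B (Python) =====
-- from typing import List
--
-- def locate_crashed_sequence(sequence: str, crash_calls: List[str]) -> bool: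
--     direct = set(crash_calls)
--     prims = {c[:c.find('$')] for c in crash_calls if '$' in c}
--     for token in sequence.split('-'):
--         if token in direct or token in prims:
--             return True
--     return False
-- ===== Notes on version B (the rewrite author's own statement) =====
-- stated objective: alternative
-- what changed: Inverts the traversal direction: instead of scanning each crash call (and its '$'-stripped primitive) against the token list, B indexes the crash calls once into two sets (calls and their primitives) and then makes one early-exit pass over the sequence tokens probing that index, eliminating the per-call inner scan.
import Mathlib
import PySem

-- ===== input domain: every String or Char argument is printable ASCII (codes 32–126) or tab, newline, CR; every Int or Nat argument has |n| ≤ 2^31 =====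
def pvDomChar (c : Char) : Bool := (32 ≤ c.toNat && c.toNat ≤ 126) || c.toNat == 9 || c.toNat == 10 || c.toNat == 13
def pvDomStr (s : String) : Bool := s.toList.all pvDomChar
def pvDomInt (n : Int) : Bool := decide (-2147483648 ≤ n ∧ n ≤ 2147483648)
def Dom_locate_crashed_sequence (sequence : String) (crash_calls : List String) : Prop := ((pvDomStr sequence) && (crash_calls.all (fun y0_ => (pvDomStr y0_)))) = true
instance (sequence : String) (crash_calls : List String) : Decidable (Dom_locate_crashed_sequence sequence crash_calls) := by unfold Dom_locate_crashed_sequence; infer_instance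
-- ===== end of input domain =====

-- B inverts the traversal: it indexes crash calls (and their '$'-stripped primitives) into two sets once, then makes one early-exit pass over the sequence tokens; objective: alternative.


-- ===== PORT A =====
-- the loop over crash_calls, early-returning true on the first match
def pvLoopA (sequence_syscalls : List String) : List String → Bool
  | [] => false
  | syscall :: rest =>
    if sequence_syscalls.contains syscall then true
    else if PySem.Str.isIn "$" syscall then
      -- primitive = syscall[:syscall.find('$')]
      if sequence_syscalls.contains
          (PySem.Str.slice syscall none (some (PySem.Str.find syscall "$"))) then true
      else pvLoopA sequence_syscalls rest
    else pvLoopA sequence_syscalls rest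

def locate_crashed_sequence (sequence : String) (crash_calls : List String) : Bool :=
  -- sequence.split('-'): split? is some for the nonempty separator "-"
  pvLoopA ((PySem.Str.split? sequence "-").getD []) crash_calls

-- ===== PORT B =====
-- the loop over the sequence tokens, early-returning true on the first token found in either set
def pvLoopB (direct prims : PySem.Set String) : List String → Bool
  | [] => false
  | t :: rest =>
    if PySem.Set.contains direct t || PySem.Set.contains prims t then true
    else pvLoopB direct prims rest

def locate_crashed_sequence_alt (sequence : String) (crash_calls : List String) : Bool :=
  let direct : PySem.Set String := PySem.Set.ofList crash_calls
  let prims : PySem.Set String := PySem.Set.ofList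
    ((crash_calls.filter (fun c => PySem.Str.isIn "$" c)).map
      (fun c => PySem.Str.slice c none (some (PySem.Str.find c "$"))))
  pvLoopB direct prims ((PySem.Str.split? sequence "-").getD [])

-- ===== PRECONDITION & SPEC =====
def Spec_locate_crashed_sequence (sequence : String) (crash_calls : List String) (out : Bool) : Prop := out = locate_crashed_sequence_alt sequence crash_calls
instance (sequence : String) (crash_calls : List String) (out : Bool) : Decidable (Spec_locate_crashed_sequence sequence crash_calls out) := by unfold Spec_locate_crashed_sequence; infer_instance

-- ===== CLAIM =====
def Claim_equal_locate_crashed_sequence : Prop := ∀ (sequence : String) (crash_calls : List String), Dom_locate_crashed_sequence sequence crash_calls → Spec_locate_crashed_sequence sequence crash_calls (locate_crashed_sequence sequence crash_calls)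

-- ===== LEMMAS AND PROOFS =====

-- abbreviation used only in the proofs: the '$'-stripped primitive of a call
def pvPrim (c : String) : String := PySem.Str.slice c none (some (PySem.Str.find c "$"))

theorem pvLoopA_iff (seq : List String) (cs : List String) :
    pvLoopA seq cs = true ↔
      ∃ c ∈ cs, c ∈ seq ∨ (PySem.Str.isIn "$" c = true ∧ pvPrim c ∈ seq) := by
  induction cs with
  | nil => simp [pvLoopA]
  | cons c rest ih =>
    simp only [pvLoopA, pvPrim]
    split_ifs with h1 h2 h3 <;> simp_all [pvPrim]

theorem pvLoopB_iff (direct prims : PySem.Set String) (ts : List String) :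
    pvLoopB direct prims ts = true ↔
      ∃ t ∈ ts, t ∈ direct ∨ t ∈ prims := by
  induction ts with
  | nil => simp [pvLoopB]
  | cons t rest ih =>
    simp only [pvLoopB]
    split_ifs with h <;>
      simp_all [PySem.Set.contains]

theorem ports_agree (sequence : String) (crash_calls : List String) :
    locate_crashed_sequence sequence crash_calls
      = locate_crashed_sequence_alt sequence crash_calls := by
  unfold locate_crashed_sequence locate_crashed_sequence_alt
  rw [Bool.eq_iff_iff, pvLoopA_iff, pvLoopB_iff]
  constructor
  · rintro ⟨c, hc, h | ⟨hd, hp⟩⟩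
    · exact ⟨c, h, Or.inl (by simpa [PySem.Set.mem_ofList] using hc)⟩
    · refine ⟨pvPrim c, hp, Or.inr ?_⟩
      simp only [PySem.Set.mem_ofList, List.mem_map, List.mem_filter]
      exact ⟨c, ⟨hc, hd⟩, rfl⟩
  · rintro ⟨t, ht, h | h⟩
    · exact ⟨t, by simpa [PySem.Set.mem_ofList] using h, Or.inl ht⟩
    · simp only [PySem.Set.mem_ofList, List.mem_map, List.mem_filter] at h
      obtain ⟨c, ⟨hc, hd⟩, he⟩ := h
      exact ⟨c, hc, Or.inr ⟨hd, by rw [← pvPrim] at he; rw [he]; exact ht⟩⟩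

-- ===== VERDICT =====
theorem locate_crashed_sequence_spec : Claim_equal_locate_crashed_sequence := by
  intro sequence crash_calls _
  unfold Spec_locate_crashed_sequence
  exact ports_agree sequence crash_calls
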